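-- pv_equiv track=rewrite | github.com/idrisoff/ProgrammSchool | circle.py | ConquestCampaign
-- ===== SOURCE A (Python) =====
-- def ConquestCampaign(N, L, battalion):
--     a = set()
--     a.add(battalion[0])
--     pred = battalion[0] - 1
--     next = battalion[0] + 1
--     count = 0
--     boolPred = True
--     boolNext = True
--
--     while not((boolPred == False) and (boolNext == False)):
--         if (pred >= 1):
--             a.add(pred)
--             pred -= 1
--         else:
--             boolPred = False
--         if (next <= N):
--             a.add(next)
--             next += 1
--         else:
--             boolNext = False
--         count += 1
--     return count
-- ===== SOURCE B (Python) =====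
-- def ConquestCampaign(N, L, battalion):
--     b = battalion[0]
--     return max(b - 1, N - b, 0) + 1
-- ===== Notes on version B (the rewrite author's own statement) =====
-- stated objective: faster
-- what changed: Replaced the outward-spreading simulation loop (and the set it fills) with the closed form max(b-1, N-b, 0)+1 for b = battalion[0].
import Mathlib
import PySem

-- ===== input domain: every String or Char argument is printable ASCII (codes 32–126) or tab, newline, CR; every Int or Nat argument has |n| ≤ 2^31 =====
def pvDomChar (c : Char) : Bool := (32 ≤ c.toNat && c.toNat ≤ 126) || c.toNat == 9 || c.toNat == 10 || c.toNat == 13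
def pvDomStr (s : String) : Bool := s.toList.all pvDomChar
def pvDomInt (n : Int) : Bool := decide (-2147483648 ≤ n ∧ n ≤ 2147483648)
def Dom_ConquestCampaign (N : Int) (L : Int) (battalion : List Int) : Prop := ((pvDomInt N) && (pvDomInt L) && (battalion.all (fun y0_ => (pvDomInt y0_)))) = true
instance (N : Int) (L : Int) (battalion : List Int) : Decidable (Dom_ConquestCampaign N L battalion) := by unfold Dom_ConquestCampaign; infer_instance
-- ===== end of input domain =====

-- B replaces A's outward-spreading simulation loop with a closed form; equivalence is on non-empty battalion (A raises IndexError on []).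

-- ===== PORT A =====
-- the while loop of A: state (pred, next, boolPred, boolNext, count); branches in Python's order.
-- A's set `a` is write-only (the returned count never reads it), so it is not carried in the state.
def CCloop (N : Int) (pred next : Int) (bp bn : Bool) (count : Int) : Int :=
  if bp = false ∧ bn = false then count
  else if pred ≥ 1 then
    if next ≤ N then CCloop N (pred - 1) (next + 1) bp bn (count + 1)
    else CCloop N (pred - 1) next bp false (count + 1)
  else
    if next ≤ N then CCloop N pred (next + 1) false bn (count + 1)
    else CCloop N pred next false false (count + 1)
termination_by (if bp then pred.toNat + 1 else 0) + (if bn then (N - next + 1).toNat + 1 else 0)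
decreasing_by
  all_goals rcases bp with _ | _ <;> rcases bn with _ | _ <;> simp_all <;> omega

def ConquestCampaign (N : Int) (L : Int) (battalion : List Int) : Int :=
  match PySem.List.pyGet? battalion 0 with
  | none => 0   -- battalion[0] raises IndexError in Python; outside Pre_
  | some b => CCloop N (b - 1) (b + 1) true true 0

-- ===== PORT B =====
def ConquestCampaign_alt (N : Int) (L : Int) (battalion : List Int) : Int :=
  match PySem.List.pyGet? battalion 0 with
  | none => 0   -- battalion[0] raises IndexError in Python; outside Pre_
  | some b => max (b - 1) (max (N - b) 0) + 1

-- ===== PRECONDITION & SPEC =====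
-- A (and B) evaluate battalion[0]: Pre_ excludes exactly the empty list, where Python raises IndexError.
def Pre_ConquestCampaign (N : Int) (L : Int) (battalion : List Int) : Prop := battalion ≠ []
instance (N : Int) (L : Int) (battalion : List Int) : Decidable (Pre_ConquestCampaign N L battalion) := by unfold Pre_ConquestCampaign; infer_instance
def pvWitness_ConquestCampaign : Int × Int × List Int := (5, 0, [3])

def Spec_ConquestCampaign (N : Int) (L : Int) (battalion : List Int) (out : Int) : Prop := out = ConquestCampaign_alt N L battalion
instance (N : Int) (L : Int) (battalion : List Int) (out : Int) : Decidable (Spec_ConquestCampaign N L battalion out) := by unfold Spec_ConquestCampaign; infer_instance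

-- ===== CLAIM (what is proved, stated in full; the proofs are below) =====
def Claim_equal_ConquestCampaign : Prop := ∀ (N : Int) (L : Int) (battalion : List Int), Dom_ConquestCampaign N L battalion → Pre_ConquestCampaign N L battalion → Spec_ConquestCampaign N L battalion (ConquestCampaign N L battalion)

-- ===== LEMMAS AND PROOFS =====
-- invariant: the loop returns count plus the number of remaining iterations,
-- max(iterations left on the pred side, iterations left on the next side)
theorem CCloop_eq (N pred next : Int) (bp bn : Bool) (count : Int) :
    CCloop N pred next bp bn count =
      count + max (if bp then max pred 0 + 1 else 0) (if bn then max (N - next + 1) 0 + 1 else 0) := by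
  fun_induction CCloop
  all_goals first
    | (rename_i ih; rw [ih]; split_ifs <;> simp_all <;> omega)
    | (split_ifs <;> simp_all <;> omega)

-- ===== VERDICT (by name: the statement is the Claim_ definition above) =====
theorem ConquestCampaign_spec : Claim_equal_ConquestCampaign := by
  intro N L battalion _ hpre
  unfold Spec_ConquestCampaign ConquestCampaign ConquestCampaign_alt
  cases battalion with
  | nil => exact absurd rfl hpre
  | cons b rest =>
    simp [PySem.List.pyGet?, PySem.List.pyIdx?, CCloop_eq]
    omega
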